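-- pv_equiv track=rewrite | github.com/Fraunhofer-AISEC/gallia | src/gallia/utils.py | unravel_2d
-- ===== SOURCE A (Python) =====
-- def auto_int(arg: str) -> int:
--     return int(arg, 0)
--
-- def unravel(listing: str) -> list[int]:
--     """
--     Parses a string representing a one-dimensional list of ranges into an equivalent python data structure.
--
--     Ranges are delimited by hyphens ('-').
--     Enumerations are delimited by commas (',').
--
--     Ranges are allowed to overlap and are merged.
--     Ranges are always unraveled, which could lead to high memory consumption for distant limits.
--
--     Example: 0,10,8-11
--     This would result in [0,8,9,10,11].
--
--     :param listing: The string representation of the one-dimensional list of ranges.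
--     :return: A list of numbers.
--     """
--
--     listing_delimiter = ","
--     range_delimiter = "-"
--     result = set()
--
--     for range_element in listing.split(listing_delimiter):
--         if range_delimiter in range_element:
--             first_tmp, last_tmp = range_element.split(range_delimiter)
--             first = auto_int(first_tmp)
--             last = auto_int(last_tmp)
--
--             for element in range(first, last + 1):
--                 result.add(element)
--         else:
--             element = auto_int(range_element)
--             result.add(element)
--
--     return sorted(result)
--
-- def unravel_2d(listing: str) -> dict[int, list[int] | None]:
--     """
--     Parses a string representing a two-dimensional list of ranges into an equivalent python data structure.
--
--     The outer dimension entries are separated by spaces (' ').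
--     Inner dimension ranges and outer dimension ranges are separated by colons (':').
--     Ranges in both dimensions are delimited by hyphens ('-').
--     Enumerations in both dimensions are delimited by commas (',').
--
--     Ranges are allowed to overlap and are merged.
--     Ranges are always unraveled, which could lead to high memory consumption for distant limits.
--     If a range with only outer dimensions is given, this will result in None for the inner list and overrides other values.
--
--     Example: "1:1,2  1-3:0,2-4  3"
--     This would result in {1: [0,1,2,3,4], 2: [0,2,3,4], 3: None}.
--
--     :param listing: The string representation of the two-dimensional list of ranges.
--     :return: A mapping of numbers in the outer dimension to numbers in the inner dimension.
--     """
--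
--     listing_delimiter = " "
--     level_delimiter = ":"
--
--     unsorted_result: dict[int, set[int] | None] = {}
--
--     for range_element in listing.split(listing_delimiter):
--         if level_delimiter in range_element:
--             first_tmp, second_tmp = range_element.split(level_delimiter)
--             first = unravel(first_tmp)
--             second = unravel(second_tmp)
--
--             for x in first:
--                 if x not in unsorted_result:
--                     unsorted_result[x] = set()
--
--                 if (ur := unsorted_result[x]) is not None:
--                     for y in second:
--                         ur.add(y)
--         else:
--             first = unravel(range_element)
--
--             for x in first:
--                 unsorted_result[x] = None
--
--     return {
--         x: None if (ur := unsorted_result[x]) is None else sorted(ur)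
--         for x in sorted(unsorted_result)
--     }
-- ===== SOURCE B (Python) =====
-- def auto_int(arg: str) -> int:
--     return int(arg, 0)
--
-- def unravel(listing: str) -> list[int]:
--     listing_delimiter = ","
--     range_delimiter = "-"
--     result = set()
--     for range_element in listing.split(listing_delimiter):
--         if range_delimiter in range_element:
--             first_tmp, last_tmp = range_element.split(range_delimiter)
--             first = auto_int(first_tmp)
--             last = auto_int(last_tmp)
--             for element in range(first, last + 1):
--                 result.add(element)
--         else:
--             element = auto_int(range_element)
--             result.add(element)
--     return sorted(result)
--
-- def unravel_2d(listing: str) -> dict: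
--     # Relational reformulation: flatten the listing into three flat relations
--     # (bare keys, colon keys, key/value edge pairs), then answer each key by
--     # querying the edge relation -- no per-key sets are maintained while parsing.
--     bare: set = set()
--     ckeys: set = set()
--     edges: set = set()
--     for tok in listing.split(" "):
--         if ":" in tok:
--             a, b = tok.split(":")
--             xs = unravel(a)
--             ys = unravel(b)
--             ckeys.update(xs)
--             edges.update((x, y) for x in xs for y in ys)
--         else:
--             bare.update(unravel(tok))
--     return {
--         x: None if x in bare else sorted(y for (k, y) in edges if k == x)
--         for x in sorted(bare | ckeys)
--     }
-- ===== Notes on version B (the rewrite author's own statement) =====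
-- stated objective: alternative
-- what changed: Instead of A's single pass that mutates per-key sets inside a dict (with a sticky None protocol), B flattens the listing into three flat relations (bare keys, colon keys, key/value edge pairs) and builds the result by querying the edge relation per sorted key; it trades A's per-key incremental sets for a flat edge relation scanned once per key.
import Mathlib
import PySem

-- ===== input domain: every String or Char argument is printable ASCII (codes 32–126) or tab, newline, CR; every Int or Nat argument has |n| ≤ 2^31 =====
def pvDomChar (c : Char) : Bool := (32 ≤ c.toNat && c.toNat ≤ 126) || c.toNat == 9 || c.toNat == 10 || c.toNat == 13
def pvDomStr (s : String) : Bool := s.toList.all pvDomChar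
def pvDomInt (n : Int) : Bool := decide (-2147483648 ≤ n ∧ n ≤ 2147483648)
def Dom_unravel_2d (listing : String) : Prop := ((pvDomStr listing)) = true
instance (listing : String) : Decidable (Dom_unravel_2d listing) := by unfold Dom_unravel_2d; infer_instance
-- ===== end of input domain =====

-- B replaces A's single pass that mutates per-key sets inside a dict (sticky-None protocol)
-- by flattening the listing into three flat relations (bare keys, colon keys, key/value edges)
-- and answering each sorted key by filtering the edge relation (objective: alternative).

-- ===== PORT A =====
-- shared helper: auto_int(arg) = int(arg, 0); none = ValueError
def autoInt? (cs : List Char) : Option Int := PySem.Int.ofCharsBase? cs 0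

-- shared helper (both Pythons call it verbatim): one comma element added to the set
def unravelElem? (s : PySem.Set Int) (e : List Char) : Option (PySem.Set Int) :=
  if PySem.Chars.isIn ['-'] e then
    -- first_tmp, last_tmp = range_element.split("-")  (raises unless exactly 2 parts)
    match PySem.Chars.splitOn e ['-'] with
    | [f, l] =>
        (autoInt? f).bind fun first =>
          (autoInt? l).map fun last =>
            -- for element in range(first, last+1): result.add(element)
            PySem.Set.update s (PySem.List.pyRange first (last + 1) 1)
    | _ => none
  else
    (autoInt? e).map fun element => PySem.Set.add s element

-- shared helper: unravel(listing); none exactly where Python raises ValueError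
def unravel? (cs : List Char) : Option (List Int) :=
  ((PySem.Chars.splitOn cs [',']).foldl
      (fun acc e => acc.bind fun s => unravelElem? s e)
      (some PySem.Set.empty)).map
    fun s => PySem.List.sorted s (fun x => x) false

-- one token of A's outer loop acting on unsorted_result
def stepA (d : PySem.Dict Int (Option (PySem.Set Int))) (tok : List Char) :
    Option (PySem.Dict Int (Option (PySem.Set Int))) :=
  if PySem.Chars.isIn [':'] tok then
    match PySem.Chars.splitOn tok [':'] with
    | [a, b] =>
        (unravel? a).bind fun first =>
          (unravel? b).map fun second =>
            first.foldl (fun d x =>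
              -- if x not in unsorted_result: unsorted_result[x] = set()
              let d1 := if d.contains x then d else d.insert x (some PySem.Set.empty)
              -- if (ur := unsorted_result[x]) is not None: for y in second: ur.add(y)
              match d1.get? x with
              | some (some ur) => d1.insert x (some (PySem.Set.update ur second))
              | _ => d1) d
    | _ => none
  else
    (unravel? tok).map fun first =>
      first.foldl (fun d x => d.insert x none) d

def unravel_2d (listing : String) : List (Int × Option (List Int)) :=
  match (PySem.Chars.splitOn listing.toList [' ']).foldl
      (fun acc tok => acc.bind fun d => stepA d tok) (some PySem.Dict.empty) with
  | none => []   -- Python raises here; excluded by Pre_unravel_2d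
  | some d =>
      (PySem.List.sorted d.keys (fun x => x) false).map fun x =>
        match d.getD x none with
        | none => (x, none)
        | some ur => (x, some (PySem.List.sorted ur (fun y => y) false))

-- ===== PORT B =====
-- one token of B's loop acting on (bare, ckeys, edges)
def stepB (st : PySem.Set Int × PySem.Set Int × PySem.Set (Int × Int)) (tok : List Char) :
    Option (PySem.Set Int × PySem.Set Int × PySem.Set (Int × Int)) :=
  if PySem.Chars.isIn [':'] tok then
    match PySem.Chars.splitOn tok [':'] with
    | [a, b] =>
        (unravel? a).bind fun xs =>
          (unravel? b).map fun ys =>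
            -- ckeys.update(xs); edges.update((x, y) for x in xs for y in ys)
            (st.1, PySem.Set.update st.2.1 xs,
              PySem.Set.update st.2.2 (xs.flatMap fun x => ys.map fun y => (x, y)))
    | _ => none
  else
    (unravel? tok).map fun zs =>
      -- bare.update(unravel(tok))
      (PySem.Set.update st.1 zs, st.2.1, st.2.2)

def unravel_2d_alt (listing : String) : List (Int × Option (List Int)) :=
  match (PySem.Chars.splitOn listing.toList [' ']).foldl
      (fun acc tok => acc.bind fun st => stepB st tok)
      (some (PySem.Set.empty, PySem.Set.empty, PySem.Set.empty)) with
  | none => []   -- Python raises here; excluded by Pre_unravel_2d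
  | some (bare, ckeys, edges) =>
      (PySem.List.sorted (PySem.Set.union bare ckeys) (fun x => x) false).map fun x =>
        if PySem.Set.contains bare x then (x, none)
        else (x, some (PySem.List.sorted
          ((edges.filter fun p => p.1 == x).map Prod.snd) (fun y => y) false))

-- ===== PRECONDITION & SPEC =====
-- Pre_: the grammar both Pythons accept without a ValueError — every space-separated token
-- splits on ':' into at most two parts, and every comma element on each side is either a
-- single int(·, 0)-parseable string or exactly two such strings joined by '-'.
def pvValidNum (cs : List Char) : Bool := (PySem.Int.ofCharsBase? cs 0).isSome

def pvValidElem (e : List Char) : Bool :=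
  if PySem.Chars.isIn ['-'] e then
    match PySem.Chars.splitOn e ['-'] with
    | [f, l] => pvValidNum f && pvValidNum l
    | _ => false
  else pvValidNum e

def pvValidRanges (cs : List Char) : Bool := (PySem.Chars.splitOn cs [',']).all pvValidElem

def pvValidTok (t : List Char) : Bool :=
  if PySem.Chars.isIn [':'] t then
    match PySem.Chars.splitOn t [':'] with
    | [a, b] => pvValidRanges a && pvValidRanges b
    | _ => false
  else pvValidRanges t

def Pre_unravel_2d (listing : String) : Prop :=
  (PySem.Chars.splitOn listing.toList [' ']).all pvValidTok = true
instance (listing : String) : Decidable (Pre_unravel_2d listing) := by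
  unfold Pre_unravel_2d; infer_instance

def pvWitness_unravel_2d : String := "1:1,2 1-3:0,2-4 3"

def Spec_unravel_2d (listing : String) (out : List (Int × Option (List Int))) : Prop :=
  out = unravel_2d_alt listing
instance (listing : String) (out : List (Int × Option (List Int))) :
    Decidable (Spec_unravel_2d listing out) := by unfold Spec_unravel_2d; infer_instance

-- ===== CLAIM (what is proved, stated in full; the proofs are below) =====
def Claim_equal_unravel_2d : Prop :=
  ∀ (listing : String), Dom_unravel_2d listing → Pre_unravel_2d listing →
    Spec_unravel_2d listing (unravel_2d listing)

-- ===== LEMMAS AND PROOFS =====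

lemma unravelElem?_isSome (s : PySem.Set Int) (e : List Char) (h : pvValidElem e = true) :
    (unravelElem? s e).isSome := by
  unfold pvValidElem at h
  unfold unravelElem?
  split at h
  · rename_i hin
    simp [hin]
    split at h
    · rename_i f l heq
      simp [pvValidNum, Option.isSome_iff_exists] at h
      obtain ⟨⟨a, ha⟩, b, hb⟩ := h
      simp [autoInt?, ha, hb]
    · exact absurd h (by simp)
  · rename_i hin
    simp [hin]
    simp [pvValidNum, Option.isSome_iff_exists] at h
    obtain ⟨a, ha⟩ := h
    simp [autoInt?, ha]

lemma foldl_bind_some {α σ : Type} (step : σ → α → Option σ) (l : List α)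
    (h : ∀ s a, a ∈ l → (step s a).isSome) :
    ∀ s, (l.foldl (fun acc x => acc.bind fun s => step s x) (some s)).isSome := by
  induction l with
  | nil => intro s; simp
  | cons a t ih =>
      intro s
      have h1 := h s a (by simp)
      obtain ⟨s1, hs1⟩ := Option.isSome_iff_exists.mp h1
      simp only [List.foldl_cons, Option.bind_some, hs1]
      exact ih (fun s a ha => h s a (by simp [ha])) s1

lemma unravel?_isSome (cs : List Char) (h : pvValidRanges cs = true) :
    ∃ xs, unravel? cs = some xs := by
  unfold unravel?
  unfold pvValidRanges at h
  rw [List.all_eq_true] at h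
  have := foldl_bind_some (fun s e => unravelElem? s e) (PySem.Chars.splitOn cs [','])
    (fun s e he => unravelElem?_isSome s e (h e he)) PySem.Set.empty
  obtain ⟨v, hv⟩ := Option.isSome_iff_exists.mp this
  exact ⟨_, by rw [hv]; rfl⟩

def pvInv (d : PySem.Dict Int (Option (PySem.Set Int))) (bare : PySem.Set Int)
    (ckeys : PySem.Set Int) (edges : PySem.Set (Int × Int)) : Prop :=
  d.keys.Nodup ∧ bare.Nodup ∧ edges.Nodup ∧
  (∀ x, x ∈ d.keys ↔ (x ∈ bare ∨ x ∈ ckeys)) ∧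
  (∀ x, d.get? x = some none ↔ x ∈ bare) ∧
  (∀ p, p ∈ edges → p.1 ∈ ckeys) ∧
  (∀ x, x ∉ bare → x ∈ ckeys →
    ∃ s, d.get? x = some (some s) ∧ s.Nodup ∧ ∀ y, (y ∈ s ↔ (x, y) ∈ edges))

lemma inv_empty : pvInv PySem.Dict.empty PySem.Set.empty PySem.Set.empty PySem.Set.empty := by
  unfold pvInv
  refine ⟨?_, ?_, ?_, ?_, ?_, ?_, ?_⟩ <;>
    simp [PySem.Set.empty, PySem.Dict.get?_empty, PySem.Dict.keys_empty]

lemma get?_foldl_insert_const {ν : Type} (xs : List Int) (v : ν) :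
    ∀ (d : PySem.Dict Int ν) (k : Int),
      (xs.foldl (fun d x => d.insert x v) d).get? k = if k ∈ xs then some v else d.get? k := by
  induction xs with
  | nil => intro d k; simp
  | cons x t ih =>
      intro d k
      simp only [List.foldl_cons, ih, PySem.Dict.get?_insert, List.mem_cons]
      by_cases hk : k ∈ t <;> by_cases hx : k = x <;> simp [hk, hx]

def stepAx (second : List Int) (d : PySem.Dict Int (Option (PySem.Set Int))) (x : Int) :
    PySem.Dict Int (Option (PySem.Set Int)) :=
  let d1 := if d.contains x then d else d.insert x (some PySem.Set.empty)
  match d1.get? x with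
  | some (some ur) => d1.insert x (some (PySem.Set.update ur second))
  | _ => d1

lemma mem_map_pair (x z : Int) (y : Int) (ys : List Int) :
    (z, y) ∈ ys.map (fun y => (x, y)) ↔ z = x ∧ y ∈ ys := by
  simp [List.mem_map]; aesop

lemma colon_step_inv (second : List Int) (x : Int)
    (d : PySem.Dict Int (Option (PySem.Set Int))) (bare ckeys : PySem.Set Int)
    (edges : PySem.Set (Int × Int)) (h : pvInv d bare ckeys edges) :
    pvInv (stepAx second d x) bare (PySem.Set.add ckeys x)
      (PySem.Set.update edges (second.map fun y => (x, y))) := by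
  obtain ⟨hd, hb, he, hmem, hnone, hfst, hval⟩ := h
  have hE : ∀ p : Int × Int, p ∈ PySem.Set.update edges (second.map fun y => (x, y)) ↔
      (p ∈ edges ∨ p ∈ second.map fun y => (x, y)) := fun p => by
    rw [PySem.Set.mem_update]
  have hC : ∀ z : Int, z ∈ PySem.Set.add ckeys x ↔ (z ∈ ckeys ∨ z = x) := fun z => by
    rw [PySem.Set.mem_add]
  have heN : (PySem.Set.update edges (second.map fun y => (x, y))).Nodup :=
    PySem.Set.nodup_update _ _ he
  have hfst' : ∀ p : Int × Int, p ∈ PySem.Set.update edges (second.map fun y => (x, y)) →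
      p.1 ∈ PySem.Set.add ckeys x := by
    intro p hp
    rcases (hE p).mp hp with hp | hp
    · exact (hC p.1).mpr (Or.inl (hfst p hp))
    · obtain ⟨y, _, rfl⟩ := List.mem_map.mp hp
      exact (hC x).mpr (Or.inr rfl)
  by_cases hxd : d.contains x
  · have hxk : x ∈ d.keys := (PySem.Dict.contains_iff_mem_keys d x).mp hxd
    have hd1 : stepAx second d x =
        match d.get? x with
        | some (some ur) => d.insert x (some (PySem.Set.update ur second))
        | _ => d := by
      simp only [stepAx, hxd, if_true]
    by_cases hxB : x ∈ bare
    · -- value is None: A leaves d unchanged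
      have hg : d.get? x = some none := (hnone x).mpr hxB
      rw [hd1, hg]
      refine ⟨hd, hb, heN, ?_, hnone, hfst', ?_⟩
      · intro z
        rw [hmem z, hC z]
        constructor
        · rintro (h1 | h1)
          · exact Or.inl h1
          · exact Or.inr (Or.inl h1)
        · rintro (h1 | h1 | rfl)
          · exact Or.inl h1
          · exact Or.inr h1
          · exact Or.inl hxB
      · intro z hzB hzC
        have hzx : z ≠ x := fun he' => hzB (he' ▸ hxB)
        have hzC' : z ∈ ckeys := ((hC z).mp hzC).resolve_right hzx
        obtain ⟨s, hs1, hs2, hs3⟩ := hval z hzB hzC'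
        refine ⟨s, hs1, hs2, fun y => ?_⟩
        rw [hs3 y, hE (z, y), mem_map_pair]
        constructor
        · exact Or.inl
        · rintro (h1 | ⟨rfl, _⟩)
          · exact h1
          · exact absurd rfl hzx
    · by_cases hxC : x ∈ ckeys
      · -- x has a set value in d
        obtain ⟨s, hs1, hs2, hs3⟩ := hval x hxB hxC
        rw [hd1, hs1]
        have hkeys : (d.insert x (some (PySem.Set.update s second))).keys = d.keys :=
          PySem.Dict.keys_insert_of_contains d _ hxd
        refine ⟨by rwa [hkeys], hb, heN, ?_, ?_, hfst', ?_⟩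
        · intro z
          rw [hkeys, hmem z, hC z]
          constructor
          · rintro (h1 | h1)
            · exact Or.inl h1
            · exact Or.inr (Or.inl h1)
          · rintro (h1 | h1 | rfl)
            · exact Or.inl h1
            · exact Or.inr h1
            · exact Or.inr hxC
        · intro z
          rw [PySem.Dict.get?_insert]
          split
          · rename_i hz; subst hz; simp [hxB]
          · exact hnone z
        · intro z hzB hzC
          rw [PySem.Dict.get?_insert]
          by_cases hzx : z = x
          · subst hzx
            refine ⟨PySem.Set.update s second, by rw [if_pos rfl],
              PySem.Set.nodup_update _ _ hs2, fun y => ?_⟩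
            rw [PySem.Set.mem_update, hs3 y, hE (z, y), mem_map_pair]
            constructor
            · rintro (h1 | h1)
              · exact Or.inl h1
              · exact Or.inr ⟨rfl, h1⟩
            · rintro (h1 | ⟨_, h1⟩)
              · exact Or.inl h1
              · exact Or.inr h1
          · rw [if_neg hzx]
            have hzC' : z ∈ ckeys := ((hC z).mp hzC).resolve_right hzx
            obtain ⟨s', hs1', hs2', hs3'⟩ := hval z hzB hzC'
            refine ⟨s', hs1', hs2', fun y => ?_⟩
            rw [hs3' y, hE (z, y), mem_map_pair]
            constructor
            · exact Or.inl
            · rintro (h1 | ⟨rfl, _⟩)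
              · exact h1
              · exact absurd rfl hzx
      · exact absurd ((hmem x).mp hxk) (by simp [hxB, hxC])
  · -- x is a fresh key everywhere
    have hxk : x ∉ d.keys := by simpa [PySem.Dict.contains_iff_mem_keys] using hxd
    have hxB : x ∉ bare := fun hc => hxk ((hmem x).mpr (Or.inl hc))
    have hxC : x ∉ ckeys := fun hc => hxk ((hmem x).mpr (Or.inr hc))
    have hxdf : d.contains x = false := by simpa using hxd
    have hd1 : stepAx second d x =
        d.insert x (some (PySem.Set.update PySem.Set.empty second)) := by
      simp only [stepAx, hxdf, Bool.false_eq_true, if_false, PySem.Dict.get?_insert_self,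
        PySem.Dict.insert_insert_self]
    rw [hd1]
    have hkeys : (d.insert x (some (PySem.Set.update PySem.Set.empty second))).keys
        = d.keys ++ [x] := PySem.Dict.keys_insert_of_not_contains d _ hxdf
    refine ⟨?_, hb, heN, ?_, ?_, hfst', ?_⟩
    · rw [hkeys]
      exact List.nodup_append.mpr ⟨hd, List.nodup_singleton x, by
        rintro a ha b hb' rfl; simp only [List.mem_singleton] at hb'; exact hxk (hb' ▸ ha)⟩
    · intro z
      rw [hkeys, hC z]
      simp only [List.mem_append, List.mem_singleton, hmem z]
      tauto
    · intro z
      rw [PySem.Dict.get?_insert]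
      split
      · rename_i hz; subst hz; simp [hxB]
      · exact hnone z
    · intro z hzB hzC
      rw [PySem.Dict.get?_insert]
      by_cases hzx : z = x
      · subst hzx
        refine ⟨PySem.Set.update PySem.Set.empty second, by rw [if_pos rfl],
          PySem.Set.nodup_update _ _ (by simp [PySem.Set.empty]), fun y => ?_⟩
        rw [PySem.Set.mem_update, hE (z, y), mem_map_pair]
        have hne : (z, y) ∉ edges := fun hc => hxC (hfst (z, y) hc)
        simp [PySem.Set.empty, hne]
      · rw [if_neg hzx]
        have hzC' : z ∈ ckeys := ((hC z).mp hzC).resolve_right hzx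
        obtain ⟨s', hs1', hs2', hs3'⟩ := hval z hzB hzC'
        refine ⟨s', hs1', hs2', fun y => ?_⟩
        rw [hs3' y, hE (z, y), mem_map_pair]
        constructor
        · exact Or.inl
        · rintro (h1 | ⟨rfl, _⟩)
          · exact h1
          · exact absurd rfl hzx

lemma set_update_flatMap (ys : List Int) (xs : List Int) :
    ∀ (e : PySem.Set (Int × Int)),
      PySem.Set.update e (xs.flatMap fun x => ys.map fun y => (x, y))
        = xs.foldl (fun e x => PySem.Set.update e (ys.map fun y => (x, y))) e := by
  induction xs with
  | nil => intro e; rfl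
  | cons x t ih =>
      intro e
      rw [List.flatMap_cons, List.foldl_cons, ← ih]
      show ((ys.map fun y => (x, y)) ++ t.flatMap fun x => ys.map fun y => (x, y)).foldl
          PySem.Set.add e = _
      rw [List.foldl_append]
      rfl

lemma colon_fold_inv (second : List Int) (xs : List Int)
    (d : PySem.Dict Int (Option (PySem.Set Int))) (bare ckeys : PySem.Set Int)
    (edges : PySem.Set (Int × Int)) (h : pvInv d bare ckeys edges) :
    pvInv (xs.foldl (stepAx second) d) bare (PySem.Set.update ckeys xs)
      (PySem.Set.update edges (xs.flatMap fun x => second.map fun y => (x, y))) := by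
  rw [set_update_flatMap]
  show pvInv _ _ (xs.foldl PySem.Set.add ckeys) _
  induction xs generalizing d ckeys edges with
  | nil => exact h
  | cons x t ih =>
      simp only [List.foldl_cons]
      exact ih _ _ _ (colon_step_inv second x d bare ckeys edges h)

lemma none_fold_inv (xs : List Int) (d : PySem.Dict Int (Option (PySem.Set Int)))
    (bare ckeys : PySem.Set Int) (edges : PySem.Set (Int × Int))
    (h : pvInv d bare ckeys edges) :
    pvInv (xs.foldl (fun d x => d.insert x none) d)
      (PySem.Set.update bare xs) ckeys edges := by
  obtain ⟨hd, hb, he, hmem, hnone, hfst, hval⟩ := h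
  have hBmem : ∀ y, y ∈ PySem.Set.update bare xs ↔ y ∈ bare ∨ y ∈ xs := fun y => by
    rw [PySem.Set.mem_update]
  have hBnodup : (PySem.Set.update bare xs).Nodup := PySem.Set.nodup_update _ _ hb
  have hdk : ∀ z, z ∈ (xs.foldl (fun d x => d.insert x none) d).keys ↔ z ∈ d.keys ∨ z ∈ xs := by
    intro z
    rw [PySem.Dict.keys_foldl_insert xs (fun _ _ => none) d, PySem.Set.mem_update]
  refine ⟨PySem.Dict.nodup_keys_foldl_insert xs (fun _ _ => none) d hd, hBnodup, he, ?_, ?_,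
    hfst, ?_⟩
  · intro z
    rw [hdk z, hBmem z, hmem z]
    tauto
  · intro z
    rw [get?_foldl_insert_const xs none d z, hBmem z]
    split
    · rename_i hz; simp [hz]
    · rw [hnone z]; rename_i hz; simp [hz]
  · intro z hzB hzC
    have hzxs : z ∉ xs := fun hc => hzB ((hBmem z).mpr (Or.inr hc))
    have hzB' : z ∉ bare := fun hc => hzB ((hBmem z).mpr (Or.inl hc))
    obtain ⟨s, hs1, hs2, hs3⟩ := hval z hzB' hzC
    exact ⟨s, by rw [get?_foldl_insert_const xs none d z, if_neg hzxs]; exact hs1, hs2, hs3⟩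

lemma final_render (d : PySem.Dict Int (Option (PySem.Set Int))) (bare ckeys : PySem.Set Int)
    (edges : PySem.Set (Int × Int)) (hinv : pvInv d bare ckeys edges) :
    ((PySem.List.sorted d.keys (fun x => x) false).map fun x =>
        match d.getD x none with
        | none => ((x : Int), (none : Option (List Int)))
        | some ur => (x, some (PySem.List.sorted ur (fun y => y) false)))
    = (PySem.List.sorted (PySem.Set.union bare ckeys) (fun x => x) false).map fun x =>
        if PySem.Set.contains bare x then (x, none)
        else (x, some (PySem.List.sorted
          ((edges.filter fun p => p.1 == x).map Prod.snd) (fun y => y) false)) := by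
  obtain ⟨hd, hb, he, hmem, hnone, hfst, hval⟩ := hinv
  have hperm : d.keys.Perm (PySem.Set.union bare ckeys) :=
    (List.perm_ext_iff_of_nodup hd (PySem.Set.nodup_union bare ckeys hb)).mpr
      (fun a => by rw [hmem a, PySem.Set.mem_union])
  have hsorted : PySem.List.sorted d.keys (fun x => x) false
      = PySem.List.sorted (PySem.Set.union bare ckeys) (fun x => x) false :=
    PySem.List.sorted_eq_sorted_of_perm _ _ _ (fun a b h => h) hperm
  rw [← hsorted]
  apply List.map_congr_left
  intro x hx
  have hxk : x ∈ d.keys := (PySem.List.mem_sorted _ _ _ x).mp hx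
  by_cases hxB : x ∈ bare
  · have hc : PySem.Set.contains bare x = true := by
      simpa [PySem.Set.contains_iff] using hxB
    have hg : d.get? x = some none := (hnone x).mpr hxB
    rw [PySem.Dict.getD_eq_get?_getD, hg, hc]
    simp
  · have hc : PySem.Set.contains bare x = false := by
      cases hb' : PySem.Set.contains bare x with
      | false => rfl
      | true => exact absurd ((PySem.Set.contains_iff bare x).mp hb') hxB
    have hxC : x ∈ ckeys := ((hmem x).mp hxk).resolve_left hxB
    obtain ⟨s, hs1, hs2, hs3⟩ := hval x hxB hxC
    rw [PySem.Dict.getD_eq_get?_getD, hs1, hc]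
    simp only [Option.getD_some, Bool.false_eq_true, if_false]
    have hLnodup : ((edges.filter fun p => p.1 == x).map Prod.snd).Nodup := by
      refine (he.filter _).map_on ?_
      intro p hp q hq hpq
      have hp1 : p.1 = x := by simpa using (List.mem_filter.mp hp).2
      have hq1 : q.1 = x := by simpa using (List.mem_filter.mp hq).2
      exact Prod.ext (hp1.trans hq1.symm) hpq
    have hLmem : ∀ y, y ∈ (edges.filter fun p => p.1 == x).map Prod.snd ↔ (x, y) ∈ edges := by
      intro y
      simp only [List.mem_map, List.mem_filter]
      constructor
      · rintro ⟨p, ⟨hp, hp1⟩, rfl⟩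
        have hpx : p.1 = x := by simpa using hp1
        have hpe : p = (x, p.2) := by rw [← hpx]
        rwa [← hpe]
      · intro hxy
        exact ⟨(x, y), ⟨hxy, by simp⟩, rfl⟩
    have : PySem.List.sorted s (fun y => y) false
        = PySem.List.sorted ((edges.filter fun p => p.1 == x).map Prod.snd)
            (fun y => y) false :=
      PySem.List.sorted_eq_sorted_of_perm _ _ _ (fun a b h => h)
        ((List.perm_ext_iff_of_nodup hs2 hLnodup).mpr (fun y => by rw [hs3 y, hLmem y]))
    rw [this]

lemma step_inv (d : PySem.Dict Int (Option (PySem.Set Int))) (bare ckeys : PySem.Set Int)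
    (edges : PySem.Set (Int × Int)) (t : List Char)
    (hv : pvValidTok t = true) (hinv : pvInv d bare ckeys edges) :
    ∃ d' bare' ckeys' edges', stepA d t = some d' ∧
      stepB (bare, ckeys, edges) t = some (bare', ckeys', edges') ∧
      pvInv d' bare' ckeys' edges' := by
  unfold pvValidTok at hv
  unfold stepA stepB
  by_cases hin : PySem.Chars.isIn [':'] t = true
  · rw [if_pos hin] at hv
    rw [if_pos hin, if_pos hin]
    split at hv
    · rename_i a b heq
      rw [Bool.and_eq_true] at hv
      obtain ⟨xs, hxs⟩ := unravel?_isSome a hv.1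
      obtain ⟨ys, hys⟩ := unravel?_isSome b hv.2
      rw [heq] at *
      rw [hxs, hys]
      simp only [Option.bind_some, Option.map_some]
      exact ⟨_, bare, _, _, rfl, rfl, colon_fold_inv ys xs d bare ckeys edges hinv⟩
    · exact absurd hv (by simp)
  · rw [if_neg hin] at hv
    rw [if_neg hin, if_neg hin]
    obtain ⟨xs, hxs⟩ := unravel?_isSome t hv
    rw [hxs]
    simp only [Option.map_some]
    exact ⟨_, _, ckeys, edges, rfl, rfl, none_fold_inv xs d bare ckeys edges hinv⟩

lemma fold_inv (toks : List (List Char)) :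
    ∀ d bare ckeys edges, toks.all pvValidTok = true → pvInv d bare ckeys edges →
    ∃ d' bare' ckeys' edges',
      toks.foldl (fun acc tok => acc.bind fun d => stepA d tok) (some d) = some d' ∧
      toks.foldl (fun acc tok => acc.bind fun st => stepB st tok)
        (some (bare, ckeys, edges)) = some (bare', ckeys', edges') ∧
      pvInv d' bare' ckeys' edges' := by
  induction toks with
  | nil => intro d bare ckeys edges _ hinv; exact ⟨d, bare, ckeys, edges, rfl, rfl, hinv⟩
  | cons t ts ih =>
      intro d bare ckeys edges hall hinv
      simp only [List.all_cons, Bool.and_eq_true] at hall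
      obtain ⟨d1, b1, c1, e1, hA, hB, hinv1⟩ := step_inv d bare ckeys edges t hall.1 hinv
      obtain ⟨d', b', c', e', hA', hB', hinv'⟩ := ih d1 b1 c1 e1 hall.2 hinv1
      exact ⟨d', b', c', e', by simpa [hA] using hA', by simpa [hB] using hB', hinv'⟩

-- ===== VERDICT (by name: the statement is the Claim_ definition above) =====
theorem unravel_2d_spec : Claim_equal_unravel_2d := by
  intro listing _ hpre
  unfold Spec_unravel_2d unravel_2d unravel_2d_alt
  obtain ⟨d', b', c', e', hA, hB, hinv⟩ :=
    fold_inv (PySem.Chars.splitOn listing.toList [' ']) PySem.Dict.empty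
      PySem.Set.empty PySem.Set.empty PySem.Set.empty hpre inv_empty
  rw [hA, hB]
  exact final_render d' b' c' e' hinv
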